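-- pv_equiv track=rewrite | github.com/msaharan/dsaiengineering | tutorials/deep-learning/optical-character-recognition/extract-books.py | select_title_author
-- ===== SOURCE A (Python) =====
-- from typing import Dict, List, Sequence, Tuple
--
-- def select_title_author(spine: Sequence[Dict]) -> Tuple[str, str]:
--     """
--     Simple extraction: longest line -> title; remaining -> author blob.
--     """
--     if not spine:
--         return "", ""
--     texts = [l["text"] for l in spine if l["text"]]
--     if not texts:
--         return "", ""
--
--     # Pick title as the longest text line; author as the next longest (if any).
--     sorted_texts = sorted(texts, key=len, reverse=True)
--     longest = sorted_texts[0]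
--     author_candidates = sorted_texts[1:3]  # up to two remaining lines
--     others = [t for t in author_candidates if t != longest]
--     title = longest.strip()
--     author = " | ".join(others).strip()
--     return title, author
-- ===== SOURCE B (Python) =====
-- from typing import Dict, Sequence, Tuple
--
-- def select_title_author(spine: Sequence[Dict]) -> Tuple[str, str]:
--     """
--     One linear pass keeping only the three longest non-empty texts
--     (stable: insert before the first strictly shorter slot), instead of
--     sorting everything.
--     """
--     top = []  # up to 3 longest texts, longest first, stable on ties
--     for l in spine:
--         t = l["text"]
--         if not t:
--             continue
--         i = 0
--         while i < len(top) and len(top[i]) >= len(t):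
--             i += 1
--         top.insert(i, t)
--         del top[3:]
--     if not top:
--         return "", ""
--     longest = top[0]
--     others = [t for t in top[1:] if t != longest]
--     return longest.strip(), " | ".join(others).strip()
-- ===== Notes on version B (the rewrite author's own statement) =====
-- stated objective: faster
-- what changed: Replaces sorting all texts by length with a single linear pass that maintains only the three longest non-empty texts (stable insertion before the first strictly shorter slot), then picks title/author from those three.
import Mathlib
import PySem

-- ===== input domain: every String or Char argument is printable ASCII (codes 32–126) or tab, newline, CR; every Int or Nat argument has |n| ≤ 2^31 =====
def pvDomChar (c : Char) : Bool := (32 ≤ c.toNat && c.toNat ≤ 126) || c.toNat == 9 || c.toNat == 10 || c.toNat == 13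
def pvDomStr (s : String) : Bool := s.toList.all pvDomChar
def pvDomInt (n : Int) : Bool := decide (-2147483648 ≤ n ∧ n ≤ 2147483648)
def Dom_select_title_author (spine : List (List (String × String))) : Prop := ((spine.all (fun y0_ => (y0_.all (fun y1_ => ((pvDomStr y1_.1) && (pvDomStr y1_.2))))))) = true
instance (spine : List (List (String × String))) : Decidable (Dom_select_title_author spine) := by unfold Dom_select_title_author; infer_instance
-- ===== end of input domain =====

-- B replaces the full stable reverse sort by one linear pass that keeps only the three
-- longest non-empty texts (stable insertion before the first strictly shorter slot).

-- l["text"] with a "" default: first match in the association list (both ports use it;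
-- Pre_ restricts to inputs where the key is present, i.e. where Python does not raise KeyError).
def pvGetText (l : List (String × String)) : String :=
  ((l.find? (fun p => p.1 == "text")).map (·.2)).getD ""

-- ===== PORT A =====
def select_title_author (spine : List (List (String × String))) : String × String :=
  if spine = [] then ("", "")
  else
    let texts := (spine.map (fun l => pvGetText l)).filter (fun t => t ≠ "")
    if texts = [] then ("", "")
    else
      let sorted_texts := PySem.List.sorted texts (fun t => PySem.Str.len t) true
      let longest := PySem.List.pyGetD sorted_texts 0 ""
      let author_candidates := PySem.List.slice sorted_texts (some 1) (some 3)
      let others := author_candidates.filter (fun t => t ≠ longest)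
      (PySem.Str.strip longest, PySem.Str.strip (PySem.Str.join " | " others))

-- ===== PORT B =====
-- B's inner while loop: walk past the slots whose length is ≥ len t, insert t there.
def pvInsTop (t : String) : List String → List String
  | [] => [t]
  | s :: rest =>
      if PySem.Str.len t ≤ PySem.Str.len s then s :: pvInsTop t rest
      else t :: s :: rest

def select_title_author_alt (spine : List (List (String × String))) : String × String :=
  let top := spine.foldl
    (fun acc l =>
      let t := pvGetText l
      if t = "" then acc else (pvInsTop t acc).take 3) []
  if top = [] then ("", "")
  else
    let longest := top.headD ""
    let others := (top.drop 1).filter (fun t => t ≠ longest)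
    (PySem.Str.strip longest, PySem.Str.strip (PySem.Str.join " | " others))

-- ===== PRECONDITION & SPEC =====
-- Pre_ excludes exactly the inputs where the Python raises KeyError: a line dict without a "text" key.
def Pre_select_title_author (spine : List (List (String × String))) : Prop :=
  ∀ l ∈ spine, (l.find? (fun p => p.1 == "text")).isSome = true
instance (spine : List (List (String × String))) : Decidable (Pre_select_title_author spine) := by
  unfold Pre_select_title_author; infer_instance

def pvWitness_select_title_author : (List (List (String × String))) :=
  [[("text", "A Longer Title "), ("page", "3")], [("text", "By Someone")], [("text", "")]]

def Spec_select_title_author (spine : List (List (String × String))) (out : String × String) : Prop := out = select_title_author_alt spine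
instance (spine : List (List (String × String))) (out : String × String) : Decidable (Spec_select_title_author spine out) := by unfold Spec_select_title_author; infer_instance

-- ===== CLAIM (what is proved, stated in full; the proofs are below) =====
def Claim_equal_select_title_author : Prop := ∀ (spine : List (List (String × String))), Dom_select_title_author spine → Pre_select_title_author spine → Spec_select_title_author spine (select_title_author spine)

-- ===== LEMMAS AND PROOFS =====

-- B's manual insertion is PySem's insertBy with the reverse-sort predicate.
theorem pvInsTop_eq_insertBy (t : String) (l : List String) :
    pvInsTop t l = PySem.List.insertBy
      (fun a b => decide (PySem.Str.len b < PySem.Str.len a)) t l := by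
  induction l with
  | nil => rfl
  | cons s rest ih =>
      simp only [pvInsTop, PySem.List.insertBy]
      by_cases h : PySem.Str.len t ≤ PySem.Str.len s
      · rw [if_pos h, if_neg (by simpa using h), ih]
      · rw [if_neg h, if_pos (by simpa using h)]

-- take n commutes with insertBy.
theorem take_insertBy {α : Type} (p : α → α → Bool) (t : α) :
    ∀ (n : Nat) (l : List α),
      (PySem.List.insertBy p t l).take n = (PySem.List.insertBy p t (l.take n)).take n := by
  intro n l
  induction l generalizing n with
  | nil => simp
  | cons s rest ih =>
      cases n with
      | zero => simp
      | succ m =>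
          simp only [PySem.List.insertBy, List.take_succ_cons]
          by_cases h : p t s = true
          · rw [if_pos h, if_pos h]
            cases m with
            | zero => simp
            | succ k => simp [List.take_succ_cons, List.take_take]
          · rw [if_neg h, if_neg h]
            simp [List.take_succ_cons, ih m]

-- folding the truncated insertion equals truncating the full insertion-sort fold.
theorem foldl_take3 {α : Type} (p : α → α → Bool) :
    ∀ (xs : List α) (acc : List α),
      xs.foldl (fun a t => (PySem.List.insertBy p t a).take 3) (acc.take 3)
        = (xs.foldl (fun a t => PySem.List.insertBy p t a) acc).take 3 := by
  intro xs
  induction xs with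
  | nil => intro acc; rfl
  | cons x rest ih =>
      intro acc
      simp only [List.foldl_cons]
      rw [← take_insertBy p x 3 acc, ih (PySem.List.insertBy p x acc)]

-- B's single pass over spine = the same pass over A's filtered text list.
theorem foldl_spine_eq {β : Type} (step : List β → String → List β) :
    ∀ (spine : List (List (String × String))) (acc : List β),
      spine.foldl (fun a l => let t := pvGetText l; if t = "" then a else step a t) acc
        = (((spine.map (fun l => pvGetText l)).filter (fun t => t ≠ "")).foldl step acc) := by
  intro spine
  induction spine with
  | nil => intro acc; rfl
  | cons l rest ih =>
      intro acc
      simp only [List.foldl_cons, List.map_cons, List.filter_cons]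
      by_cases h : pvGetText l = ""
      · simp [h, ih]
      · simp [h, ih]

theorem top_eq_take3 (spine : List (List (String × String))) :
    (spine.foldl (fun acc l =>
        let t := pvGetText l
        if t = "" then acc else (pvInsTop t acc).take 3) [])
      = (PySem.List.sorted ((spine.map (fun l => pvGetText l)).filter (fun t => t ≠ ""))
          (fun t => PySem.Str.len t) true).take 3 := by
  rw [PySem.List.sorted_rev_eq_foldl_insertBy]
  have h1 := foldl_spine_eq (fun a (t : String) =>
    (PySem.List.insertBy (fun a b => decide (PySem.Str.len b < PySem.Str.len a)) t a).take 3) spine []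
  have h2 := foldl_take3 (fun a b : String => decide (PySem.Str.len b < PySem.Str.len a))
    ((spine.map (fun l => pvGetText l)).filter (fun t => t ≠ "")) []
  simp only [List.take_nil] at h2
  calc (spine.foldl (fun acc l =>
          let t := pvGetText l
          if t = "" then acc else (pvInsTop t acc).take 3) [])
      = (spine.foldl (fun acc l =>
          let t := pvGetText l
          if t = "" then acc
          else (PySem.List.insertBy (fun a b => decide (PySem.Str.len b < PySem.Str.len a)) t acc).take 3) []) := by
        simp only [pvInsTop_eq_insertBy]
    _ = _ := by rw [h1, h2]

-- ===== VERDICT (by name: the statement is the Claim_ definition above) =====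
theorem select_title_author_spec : Claim_equal_select_title_author := by
  intro spine _ _
  unfold Spec_select_title_author select_title_author select_title_author_alt
  rw [top_eq_take3 spine]
  set texts := (spine.map (fun l => pvGetText l)).filter (fun t => t ≠ "") with htexts
  by_cases hsp : spine = []
  · subst hsp; rfl
  · rw [if_neg hsp]
    by_cases ht : texts = []
    · rw [if_pos ht, ht]
      rfl
    · rw [if_neg ht]
      have hs : PySem.List.sorted texts (fun t => PySem.Str.len t) true ≠ [] := by
        simpa [PySem.List.sorted_eq_nil_iff] using ht
      obtain ⟨m, tl, hm⟩ := List.exists_cons_of_ne_nil hs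
      rw [hm]
      have hslice : PySem.List.slice (m :: tl) (some 1) (some 3) = tl.take 2 := by
        have := PySem.List.slice_natCast (m :: tl) 1 3
        simpa using this
      simp [hslice, PySem.List.pyGetD_zero_cons, List.take_succ_cons]
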